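-- pv_equiv track=rewrite | github.com/testflows/TestFlows-Core | testflows/_core/translate_prefix.py | process_stack
-- ===== SOURCE A (Python) =====
-- def process_stack(stack, process):
--     def regex():
--         if not stack:
--             return ''
--         item = stack.pop(0)
--         if process == "optional" and stack:
--             must_be_followed_by = ['$']
--             for i in range(len(stack)):
--                 must_be_followed_by.append('(' + ''.join(stack[:i+1]) + ')')
--             return f'({item}(?={"|".join(must_be_followed_by)}){regex()})?'
--         else:
--             return f'({item}{regex()})?'
--     return regex()
-- ===== SOURCE B (Python) =====
-- # B: iterative back-to-front build with a running-prefix accumulator (replaces A's recursion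
-- # and its repeated join over slices). Like A, it empties the `stack` argument in place.
-- def process_stack(stack, process):
--     items = list(stack)
--     del stack[:]
--     inner = ''
--     for i in range(len(items) - 1, -1, -1):
--         item = items[i]
--         rest = items[i + 1:]
--         if process == 'optional' and rest:
--             parts = ['$']
--             acc = ''
--             for s in rest:
--                 acc += s
--                 parts.append('(' + acc + ')')
--             inner = f'({item}(?={"|".join(parts)}){inner})?'
--         else:
--             inner = f'({item}{inner})?'
--     return inner
-- ===== Notes on version B (the rewrite author's own statement) =====
-- stated objective: alternative
-- what changed: Replaces A's pop(0) recursion and per-index ''.join over a slice by a single reversed iterative pass with an inner accumulator plus a running-prefix fold for the lookahead alternatives (same in-place emptying of stack).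
import Mathlib
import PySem

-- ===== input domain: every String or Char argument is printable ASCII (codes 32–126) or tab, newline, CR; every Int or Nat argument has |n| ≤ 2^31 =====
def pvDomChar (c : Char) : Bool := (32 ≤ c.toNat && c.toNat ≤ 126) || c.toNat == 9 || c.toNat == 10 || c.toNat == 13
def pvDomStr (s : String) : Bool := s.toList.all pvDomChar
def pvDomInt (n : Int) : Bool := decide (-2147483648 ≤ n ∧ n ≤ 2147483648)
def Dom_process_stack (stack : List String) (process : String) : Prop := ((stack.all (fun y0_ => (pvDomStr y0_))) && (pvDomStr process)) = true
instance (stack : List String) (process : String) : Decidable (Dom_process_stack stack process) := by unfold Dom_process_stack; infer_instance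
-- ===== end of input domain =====

-- B replaces A's pop(0)-recursion and per-index slice-joins by one reversed pass with an
-- accumulator and a running-prefix fold (simpler decomposition, no recursion).
-- Side effects: both A and B empty the `stack` list in place; the theorems are about the return value.

-- ===== PORT A =====
-- A's inner `regex()`: pop(0) = head, the remaining stack = tail; recursion on the tail.
def pvARegex (stack : List String) (process : String) : String :=
  match stack with
  | [] => ""
  | item :: rest =>
    if process == "optional" && !rest.isEmpty then
      -- must_be_followed_by = ['$']; for i in range(len(stack)): append('(' + ''.join(stack[:i+1]) + ')')
      let mbfb := (PySem.List.pyRange 0 (rest.length : Int) 1).foldl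
        (fun acc i => acc ++ ["(" ++ PySem.Str.join "" (PySem.List.slice rest (some 0) (some (i + 1))) ++ ")"]) ["$"]
      "(" ++ item ++ "(?=" ++ PySem.Str.join "|" mbfb ++ ")" ++ pvARegex rest process ++ ")?"
    else
      "(" ++ item ++ pvARegex rest process ++ ")?"

def process_stack (stack : List String) (process : String) : String :=
  pvARegex stack process

-- ===== PORT B =====
-- one loop step of Source B: state = (inner, rest); `rest = [item] + rest` at the end of the body
def pvAltStep (process : String) (st : String × List String) (item : String) : String × List String :=
  let inner := st.1
  let rest := st.2
  let inner' :=
    if process == "optional" && !rest.isEmpty then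
      -- parts = ['$']; acc = ''; for s in rest: acc += s; parts.append('(' + acc + ')')
      let parts := (rest.foldl
        (fun (pa : List String × String) s => (pa.1 ++ ["(" ++ pa.2 ++ s ++ ")"], pa.2 ++ s))
        (["$"], "")).1
      "(" ++ item ++ "(?=" ++ PySem.Str.join "|" parts ++ ")" ++ inner ++ ")?"
    else
      "(" ++ item ++ inner ++ ")?"
  (inner', item :: rest)

def process_stack_alt (stack : List String) (process : String) : String :=
  (stack.reverse.foldl (pvAltStep process) ("", [])).1

-- ===== PRECONDITION & SPEC =====
def Spec_process_stack (stack : List String) (process : String) (out : String) : Prop := out = process_stack_alt stack process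
instance (stack : List String) (process : String) (out : String) : Decidable (Spec_process_stack stack process out) := by unfold Spec_process_stack; infer_instance

-- ===== CLAIM (what is proved, stated in full; the proofs are below) =====
def Claim_equal_process_stack : Prop := ∀ (stack : List String) (process : String), Dom_process_stack stack process → Spec_process_stack stack process (process_stack stack process)

-- ===== LEMMAS AND PROOFS =====

-- ''.join over a cons is plain concatenation
theorem pvJoinEmptyCons (x : String) (xs : List String) :
    PySem.Str.join "" (x :: xs) = x ++ PySem.Str.join "" xs := by
  have h : (PySem.Str.join "" (x :: xs)).toList = (x ++ PySem.Str.join "" xs).toList := by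
    cases xs with
    | nil => simp [PySem.Str.toList_join, PySem.Chars.join_singleton, PySem.Chars.join_nil]
    | cons b bs =>
      simp only [PySem.Str.toList_join, List.map_cons, String.toList_empty,
        PySem.Chars.join_cons_cons, String.toList_append]
      simp
  exact String.toList_inj.mp h

theorem pvJoinEmptyNil : PySem.Str.join "" ([] : List String) = "" := by
  have h : (PySem.Str.join "" ([] : List String)).toList = ("" : String).toList := by
    simp [PySem.Str.toList_join, PySem.Chars.join_nil]
  exact String.toList_inj.mp h

-- B's running-prefix fold characterised: it appends one bracketed prefix-join per prefix of rest
theorem pvPartsFold (rest : List String) (p : List String) (a : String) :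
    (rest.foldl
        (fun (pa : List String × String) s => (pa.1 ++ ["(" ++ pa.2 ++ s ++ ")"], pa.2 ++ s))
        (p, a)).1
      = p ++ (List.range rest.length).map
          (fun k => "(" ++ a ++ PySem.Str.join "" (rest.take (k + 1)) ++ ")") := by
  induction rest generalizing p a with
  | nil => simp
  | cons s rest ih =>
    simp only [List.foldl_cons]
    rw [ih]
    simp only [List.length_cons, List.range_succ_eq_map, List.map_cons, List.map_map,
      List.take_succ_cons, List.take_zero]
    rw [pvJoinEmptyCons s [], pvJoinEmptyNil, List.append_assoc, List.singleton_append]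
    congr 1
    congr 1
    · simp [String.append_assoc]
    · apply List.map_congr_left
      intro k _
      simp [pvJoinEmptyCons, String.append_assoc]

-- A's range/slice loop characterised in the same normal form
theorem pvMbfbFold (rest : List String) :
    (PySem.List.pyRange 0 (rest.length : Int) 1).foldl
        (fun acc i => acc ++ ["(" ++ PySem.Str.join "" (PySem.List.slice rest (some 0) (some (i + 1))) ++ ")"]) ["$"]
      = ["$"] ++ (List.range rest.length).map
          (fun k => "(" ++ PySem.Str.join "" (rest.take (k + 1)) ++ ")") := by
  rw [PySem.List.foldl_append_singleton_eq_map, PySem.List.pyRange_zero_natCast, List.map_map]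
  congr 1
  apply List.map_congr_left
  intro k _
  simp only [Function.comp_apply]
  congr 2
  have : ((k : Int) + 1) = ((k + 1 : Nat) : Int) := by push_cast; ring
  rw [this, PySem.List.slice_zero_start, PySem.List.slice_to_natCast]

-- the loop invariant: after processing l back-to-front, state = (A's regex for l, l)
theorem pvLoopInv (l : List String) (process : String) :
    l.reverse.foldl (pvAltStep process) ("", []) = (pvARegex l process, l) := by
  induction l with
  | nil => simp [pvARegex]
  | cons x tl ih =>
    rw [List.reverse_cons, List.foldl_append, ih]
    simp only [List.foldl_cons, List.foldl_nil]
    unfold pvAltStep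
    conv_rhs => rw [pvARegex.eq_def]
    simp only []
    by_cases h : (process == "optional" && !tl.isEmpty) = true
    · simp only [h, if_true]
      rw [pvPartsFold tl ["$"] "", pvMbfbFold tl]
      simp
    · simp only [Bool.not_eq_true] at h
      simp [h]

-- ===== VERDICT (by name: the statement is the Claim_ definition above) =====
theorem process_stack_spec : Claim_equal_process_stack := by
  intro stack process _
  unfold Spec_process_stack process_stack process_stack_alt
  rw [pvLoopInv]
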